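-- pv_equiv track=rewrite | github.com/areeves87/flavor-vibe | test_flavor_bible.py | get_mutual_pairings
-- ===== SOURCE A (Python) =====
-- def get_expected_graph(selected_flavors: list[str], smaller_data: list[dict]) -> tuple[set, set]:
--     """
--     Compute expected nodes and edges for a selection.
--     Returns (nodes, edges) where edges are frozensets of (source, target).
--     """
--     selected = set(f.lower() for f in selected_flavors)
--
--     nodes = set(selected)
--     edges = set()
--
--     for row in smaller_data:
--         main, pairing = row["main"], row["pairing"]
--         if main in selected:
--             nodes.add(pairing)
--             # Edge as frozenset so order doesn't matter
--             edges.add(frozenset([main, pairing]))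
--         if pairing in selected:
--             nodes.add(main)
--             edges.add(frozenset([main, pairing]))
--
--     return nodes, edges
--
-- def get_mutual_pairings(selected_flavors: list[str], smaller_data: list[dict]) -> set:
--     """Get pairings that connect to ALL selected flavors."""
--     selected = set(f.lower() for f in selected_flavors)
--     if len(selected) <= 1:
--         # With 0-1 selections, mutual is same as normal
--         return get_expected_graph(selected_flavors, smaller_data)[0] - selected
--
--     pairing_connections = {}  # pairing -> set of connected selected flavors
--     for row in smaller_data:
--         main, pairing = row["main"], row["pairing"]
--         if main in selected and pairing not in selected:
--             pairing_connections.setdefault(pairing, set()).add(main)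
--         if pairing in selected and main not in selected:
--             pairing_connections.setdefault(main, set()).add(pairing)
--
--     return {p for p, conns in pairing_connections.items() if conns == selected}
-- ===== SOURCE B (Python) =====
-- def get_mutual_pairings(selected_flavors, smaller_data):
--     """Get pairings that connect to ALL selected flavors."""
--     selected = set(f.lower() for f in selected_flavors)
--
--     def linked(f, p):
--         # is there any record pairing flavor f with p (either orientation)?
--         return any((r["main"] == f and r["pairing"] == p) or
--                    (r["pairing"] == f and r["main"] == p) for r in smaller_data)
--
--     # stage 1: non-selected endpoints adjacent to some selected flavor
--     candidates = []
--     for row in smaller_data: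
--         for x, y in ((row["main"], row["pairing"]), (row["pairing"], row["main"])):
--             if x in selected and y not in selected and y not in candidates:
--                 candidates.append(y)
--
--     # stage 2: keep candidates directly linked to every selected flavor
--     return {p for p in candidates if all(linked(f, p) for f in selected)}
-- ===== Notes on version B (the rewrite author's own statement) =====
-- stated objective: simpler
-- what changed: Replaces A's two separate code paths (delegation to get_expected_graph for <=1 selections, and a dict mapping each pairing to its set of connected selected flavors compared with ==) by one branch-free two-stage scheme: first collect the ordered list of non-selected endpoints adjacent to a selected flavor, then keep those for which a direct any()-rescan of the raw records confirms a link to every selected flavor; no dict, edge set or length guard is kept.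
import Mathlib
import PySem

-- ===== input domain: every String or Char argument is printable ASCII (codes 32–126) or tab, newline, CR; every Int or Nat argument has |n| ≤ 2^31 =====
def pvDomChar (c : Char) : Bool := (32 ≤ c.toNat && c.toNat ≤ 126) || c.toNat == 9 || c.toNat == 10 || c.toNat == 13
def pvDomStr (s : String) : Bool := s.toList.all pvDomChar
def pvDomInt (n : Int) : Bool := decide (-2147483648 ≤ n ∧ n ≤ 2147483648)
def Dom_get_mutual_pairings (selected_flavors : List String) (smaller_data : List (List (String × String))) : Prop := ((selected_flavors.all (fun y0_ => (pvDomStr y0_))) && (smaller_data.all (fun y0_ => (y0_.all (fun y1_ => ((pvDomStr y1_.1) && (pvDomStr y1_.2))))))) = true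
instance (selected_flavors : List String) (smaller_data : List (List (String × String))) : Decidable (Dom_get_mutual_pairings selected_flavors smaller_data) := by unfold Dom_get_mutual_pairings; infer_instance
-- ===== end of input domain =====

-- B drops A's two code paths (graph delegation for <=1 selections, per-pairing connection dict
-- compared with ==) for a branch-free two-stage scheme: an ordered candidate pass plus a direct
-- any()/all() rescan of the raw records (simpler; no speed claim).

-- ===== PORT A =====
-- frozenset([main, pairing]) represented canonically as the sorted duplicate-free list of its
-- elements, so structural equality coincides with Python's frozenset equality (exact).

def pvFrozen2 (main pairing : String) : List String :=
  PySem.List.sorted (PySem.Set.ofList [main, pairing]) (fun x => x) false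

def pvRowGraph (selected : PySem.Set String)
    (st : PySem.Set String × PySem.Set (List String)) (row : List (String × String)) :
    PySem.Set String × PySem.Set (List String) :=
  match (PySem.Dict.mk row).get? "main", (PySem.Dict.mk row).get? "pairing" with
  | some main, some pairing =>
    let st := if PySem.Set.contains selected main then
        (PySem.Set.add st.1 pairing, PySem.Set.add st.2 (pvFrozen2 main pairing)) else st
    if PySem.Set.contains selected pairing then
        (PySem.Set.add st.1 main, PySem.Set.add st.2 (pvFrozen2 main pairing)) else st
  | _, _ => st

def get_expected_graph (selected_flavors : List String) (smaller_data : List (List (String × String))) :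
    PySem.Set String × PySem.Set (List String) :=
  let selected : PySem.Set String := PySem.Set.ofList (selected_flavors.map (fun f => PySem.Str.lower f))
  let nodes : PySem.Set String := PySem.Set.ofList selected
  smaller_data.foldl (pvRowGraph selected) (nodes, PySem.Set.empty)

def pvRowConn (selected : PySem.Set String)
    (pc : PySem.Dict String (PySem.Set String)) (row : List (String × String)) :
    PySem.Dict String (PySem.Set String) :=
  match (PySem.Dict.mk row).get? "main", (PySem.Dict.mk row).get? "pairing" with
  | some main, some pairing =>
    let pc := if PySem.Set.contains selected main && !(PySem.Set.contains selected pairing) then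
        pc.modify pairing PySem.Set.empty (fun s => PySem.Set.add s main) else pc
    if PySem.Set.contains selected pairing && !(PySem.Set.contains selected main) then
        pc.modify main PySem.Set.empty (fun s => PySem.Set.add s pairing) else pc
  | _, _ => pc

def get_mutual_pairings (selected_flavors : List String) (smaller_data : List (List (String × String))) : List String :=
  let selected : PySem.Set String := PySem.Set.ofList (selected_flavors.map (fun f => PySem.Str.lower f))
  if PySem.Set.len selected ≤ 1 then
    PySem.Set.diff (get_expected_graph selected_flavors smaller_data).1 selected
  else
    let pc := smaller_data.foldl (pvRowConn selected) PySem.Dict.empty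
    PySem.Set.ofList (((PySem.Dict.items pc).filter
      (fun pr => PySem.Set.equal pr.2 selected)).map (fun pr => pr.1))

-- ===== PORT B =====
-- linked(f, p): any() over the raw records, either orientation (B's helper)

def pvRowLinks (row : List (String × String)) (f p : String) : Bool :=
  match (PySem.Dict.mk row).get? "main", (PySem.Dict.mk row).get? "pairing" with
  | some main, some pairing => (main == f && pairing == p) || (pairing == f && main == p)
  | _, _ => false

def pvLinked (smaller_data : List (List (String × String))) (f p : String) : Bool :=
  smaller_data.any (fun r => pvRowLinks r f p)

-- one guarded (x, y) check of B's inner for-loop over the candidate list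

def pvCandCheck (selected : PySem.Set String) (cands : List String) (x y : String) : List String :=
  if PySem.Set.contains selected x && !(PySem.Set.contains selected y) && !(cands.contains y) then
    cands ++ [y] else cands

def pvCandRow (selected : PySem.Set String) (cands : List String) (row : List (String × String)) : List String :=
  match (PySem.Dict.mk row).get? "main", (PySem.Dict.mk row).get? "pairing" with
  | some main, some pairing => pvCandCheck selected (pvCandCheck selected cands main pairing) pairing main
  | _, _ => cands

def get_mutual_pairings_alt (selected_flavors : List String) (smaller_data : List (List (String × String))) : List String :=
  let selected : PySem.Set String := PySem.Set.ofList (selected_flavors.map (fun f => PySem.Str.lower f))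
  let candidates := smaller_data.foldl (pvCandRow selected) []
  PySem.Set.ofList (candidates.filter (fun p => selected.all (fun f => pvLinked smaller_data f p)))

-- ===== PRECONDITION & SPEC =====
-- Pre_ excludes exactly the rows on which Python's row["main"] / row["pairing"] raises KeyError.
def Pre_get_mutual_pairings (selected_flavors : List String) (smaller_data : List (List (String × String))) : Prop :=
  ∀ row ∈ smaller_data, "main" ∈ row.map Prod.fst ∧ "pairing" ∈ row.map Prod.fst
instance (selected_flavors : List String) (smaller_data : List (List (String × String))) : Decidable (Pre_get_mutual_pairings selected_flavors smaller_data) := by unfold Pre_get_mutual_pairings; infer_instance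

def pvWitness_get_mutual_pairings : List String × (List (List (String × String))) :=
  (["a", "b"], [[("main", "a"), ("pairing", "x")], [("main", "x"), ("pairing", "b")]])

def Spec_get_mutual_pairings (selected_flavors : List String) (smaller_data : List (List (String × String))) (out : List String) : Prop := out = get_mutual_pairings_alt selected_flavors smaller_data
instance (selected_flavors : List String) (smaller_data : List (List (String × String))) (out : List String) : Decidable (Spec_get_mutual_pairings selected_flavors smaller_data out) := by unfold Spec_get_mutual_pairings; infer_instance

-- ===== CLAIM (what is proved, stated in full; the proofs are below) =====
def Claim_equal_get_mutual_pairings : Prop := ∀ (selected_flavors : List String) (smaller_data : List (List (String × String))), Dom_get_mutual_pairings selected_flavors smaller_data → Pre_get_mutual_pairings selected_flavors smaller_data → Spec_get_mutual_pairings selected_flavors smaller_data (get_mutual_pairings selected_flavors smaller_data)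

-- ===== LEMMAS AND PROOFS =====

-- invariant tying A's pairing_connections dict (over the processed prefix L) to B's candidate list
def InvC (sel : PySem.Set String) (pc : PySem.Dict String (PySem.Set String))
    (cands : List String) (L : List (List (String × String))) : Prop :=
  pc.keys = cands ∧ cands.Nodup ∧
  (∀ f p, f ∈ pc.getD p PySem.Set.empty ↔ (f ∈ sel ∧ p ∉ sel ∧ pvLinked L f p = true)) ∧
  (∀ p ∈ cands, ∃ f, f ∈ pc.getD p PySem.Set.empty)

-- invariant tying A's nodes set to B's candidate list
def InvN (sel : PySem.Set String) (nodes : PySem.Set String)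
    (cands : List String) (L : List (List (String × String))) : Prop :=
  nodes = sel ++ cands ∧ (sel ++ cands).Nodup ∧
  (∀ p ∈ cands, ∃ f ∈ sel, pvLinked L f p = true)

theorem linked_append (L R : List (List (String × String))) (f p : String) :
    pvLinked (L ++ R) f p = (pvLinked L f p || pvLinked R f p) := by
  simp [pvLinked, List.any_append]

theorem invC_check (sel : PySem.Set String) (pc : PySem.Dict String (PySem.Set String))
    (cands : List String) (a b : String)
    (h1 : pc.keys = cands) (h2 : cands.Nodup) :
    ((if PySem.Set.contains sel a && !(PySem.Set.contains sel b) then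
        pc.modify b PySem.Set.empty (fun s => PySem.Set.add s a) else pc).keys
      = pvCandCheck sel cands a b) ∧
    (pvCandCheck sel cands a b).Nodup ∧
    (∀ f p, f ∈ (if PySem.Set.contains sel a && !(PySem.Set.contains sel b) then
        pc.modify b PySem.Set.empty (fun s => PySem.Set.add s a) else pc).getD p PySem.Set.empty
      ↔ (f ∈ pc.getD p PySem.Set.empty ∨ (a ∈ sel ∧ b ∉ sel ∧ p = b ∧ f = a))) := by
  by_cases hg : (PySem.Set.contains sel a && !(PySem.Set.contains sel b)) = true
  · have hg' := hg
    rw [Bool.and_eq_true, Bool.not_eq_true'] at hg'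
    obtain ⟨hca, hcb⟩ := hg'
    have ha : a ∈ sel := (PySem.Set.contains_iff sel a).mp hca
    have hb : b ∉ sel := by
      intro hm
      have hx := (PySem.Set.contains_iff sel b).mpr hm
      rw [hcb] at hx
      exact Bool.false_ne_true hx
    have hget : ∀ f p, f ∈ (pc.modify b PySem.Set.empty (fun s => PySem.Set.add s a)).getD p PySem.Set.empty
        ↔ (f ∈ pc.getD p PySem.Set.empty ∨ (a ∈ sel ∧ b ∉ sel ∧ p = b ∧ f = a)) := by
      intro f p
      rw [PySem.Dict.getD_modify]
      by_cases hp : p = b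
      · subst hp
        rw [if_pos rfl, PySem.Set.mem_add]
        constructor
        · rintro (hf | rfl)
          · exact Or.inl hf
          · exact Or.inr ⟨ha, hb, rfl, rfl⟩
        · rintro (hf | ⟨_, _, _, rfl⟩)
          · exact Or.inl hf
          · exact Or.inr rfl
      · rw [if_neg hp]
        constructor
        · exact Or.inl
        · rintro (hf | ⟨_, _, rfl, _⟩)
          · exact hf
          · exact absurd rfl hp
    rw [if_pos hg]
    by_cases hbc : cands.contains b = true
    · have hbmem : b ∈ pc.keys := h1 ▸ (List.contains_iff_mem.mp hbc)
      have hpcb : pc.contains b = true := (PySem.Dict.contains_iff_mem_keys pc b).mpr hbmem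
      have hbmem' : b ∈ cands := List.contains_iff_mem.mp hbc
      have hC : pvCandCheck sel cands a b = cands := by
        simp [pvCandCheck, hbmem']
      rw [hC]
      refine ⟨?_, h2, hget⟩
      rw [PySem.Dict.keys_modify, PySem.Dict.keys_insert_of_contains _ _ hpcb]; exact h1
    · have hbc' : cands.contains b = false := by simpa using hbc
      have hbmem : b ∉ cands := fun hm => hbc (List.contains_iff_mem.mpr hm)
      have hpcb : pc.contains b = false := by
        cases hx : pc.contains b with
        | false => rfl
        | true => exact absurd (h1 ▸ (PySem.Dict.contains_iff_mem_keys pc b).mp hx) hbmem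
      have hC : pvCandCheck sel cands a b = cands ++ [b] := by
        unfold pvCandCheck
        rw [if_pos (by simp; exact ⟨⟨ha, hb⟩, hbmem⟩)]
      rw [hC]
      refine ⟨?_, ?_, hget⟩
      · rw [PySem.Dict.keys_modify, PySem.Dict.keys_insert_of_not_contains _ _ hpcb, h1]
      · simp [List.nodup_append, h2]
        exact fun x hx hxb => hbmem (hxb ▸ hx)
  · have hC : pvCandCheck sel cands a b = cands := by
      unfold pvCandCheck
      rw [Bool.and_eq_true] at hg
      rw [if_neg]
      intro hx
      rw [Bool.and_eq_true, Bool.and_eq_true] at hx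
      exact hg ⟨hx.1.1, hx.1.2⟩
    have hno : ¬(a ∈ sel ∧ b ∉ sel) := by
      rintro ⟨ha', hb'⟩
      apply hg
      have hcbf : sel.contains b = false := by
        cases hx : sel.contains b with
        | false => rfl
        | true => exact absurd ((PySem.Set.contains_iff sel b).mp hx) hb'
      simp
      exact ⟨ha', hb'⟩
    rw [if_neg hg, hC]
    refine ⟨h1, h2, ?_⟩
    intro f p
    constructor
    · exact Or.inl
    · rintro (hf | ⟨ha', hb', _, _⟩)
      · exact hf
      · exact absurd ⟨ha', hb'⟩ hno

theorem mem_candCheck (sel : PySem.Set String) (c : List String) (a b p : String)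
    (hp : p ∈ pvCandCheck sel c a b) : p ∈ c ∨ (a ∈ sel ∧ b ∉ sel ∧ p = b) := by
  unfold pvCandCheck at hp
  by_cases hg : ((PySem.Set.contains sel a && !(PySem.Set.contains sel b)) && !(c.contains b)) = true
  · rw [if_pos hg] at hp
    rcases List.mem_append.mp hp with h | h
    · exact Or.inl h
    · simp at h hg
      exact Or.inr ⟨hg.1.1, hg.1.2, h⟩
  · rw [if_neg hg] at hp; exact Or.inl hp

theorem invC_row (sel : PySem.Set String) (pc : PySem.Dict String (PySem.Set String))
    (cands : List String) (row : List (String × String)) (L : List (List (String × String)))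
    (h : InvC sel pc cands L) :
    InvC sel (pvRowConn sel pc row) (pvCandRow sel cands row) (L ++ [row]) := by
  obtain ⟨h1, h2, h3, h4⟩ := h
  have htriv : ∀ hm : (PySem.Dict.mk row).get? "main" = (PySem.Dict.mk row).get? "main",
      True := fun _ => trivial
  rcases hm : (PySem.Dict.mk row).get? "main" with _ | main
  · have hrow0 : ∀ f p, pvLinked (L ++ [row]) f p = pvLinked L f p := by
      intro f p
      rw [linked_append]
      have : pvLinked [row] f p = false := by simp [pvLinked, pvRowLinks, hm]
      rw [this, Bool.or_false]
    rcases hp : (PySem.Dict.mk row).get? "pairing" with _ | pairing <;>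
      simp only [pvRowConn, pvCandRow, hm, hp] <;>
      exact ⟨h1, h2, fun f p => by rw [hrow0]; exact h3 f p, h4⟩
  · rcases hp : (PySem.Dict.mk row).get? "pairing" with _ | pairing
    · have hrow0 : ∀ f p, pvLinked (L ++ [row]) f p = pvLinked L f p := by
        intro f p
        rw [linked_append]
        have : pvLinked [row] f p = false := by simp [pvLinked, pvRowLinks, hm, hp]
        rw [this, Bool.or_false]
      simp only [pvRowConn, pvCandRow, hm, hp]
      exact ⟨h1, h2, fun f p => by rw [hrow0]; exact h3 f p, h4⟩
    · have hrow : ∀ f p, pvLinked (L ++ [row]) f p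
          = (pvLinked L f p || ((main == f && pairing == p) || (pairing == f && main == p))) := by
        intro f p
        rw [linked_append]
        have : pvLinked [row] f p = ((main == f && pairing == p) || (pairing == f && main == p)) := by
          simp [pvLinked, pvRowLinks, hm, hp]
        rw [this]
      simp only [pvRowConn, pvCandRow, hm, hp]
      obtain ⟨k1, n1, g1⟩ := invC_check sel pc cands main pairing h1 h2
      obtain ⟨k2, n2, g2⟩ := invC_check sel _ _ pairing main k1 n1
      refine ⟨k2, n2, ?_, ?_⟩
      · intro f p
        rw [g2, g1, h3, hrow]
        simp only [Bool.or_eq_true, Bool.and_eq_true, beq_iff_eq]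
        constructor
        · rintro ((⟨hf1, hf2, hf3⟩ | ⟨hm1, hp1, rfl, rfl⟩) | ⟨hm2, hp2, rfl, rfl⟩)
          · exact ⟨hf1, hf2, Or.inl hf3⟩
          · exact ⟨hm1, hp1, Or.inr (Or.inl ⟨rfl, rfl⟩)⟩
          · exact ⟨hm2, hp2, Or.inr (Or.inr ⟨rfl, rfl⟩)⟩
        · rintro ⟨hf1, hf2, hl | ⟨rfl, rfl⟩ | ⟨rfl, rfl⟩⟩
          · exact Or.inl (Or.inl ⟨hf1, hf2, hl⟩)
          · exact Or.inl (Or.inr ⟨hf1, hf2, rfl, rfl⟩)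
          · exact Or.inr ⟨hf1, hf2, rfl, rfl⟩
      · intro p hp2mem
        rcases mem_candCheck _ _ _ _ _ hp2mem with hp1mem | ⟨hs, hns, hpe⟩
        · rcases mem_candCheck _ _ _ _ _ hp1mem with hpold | ⟨hs, hns, hpe⟩
          · obtain ⟨f, hf⟩ := h4 p hpold
            exact ⟨f, (g2 f p).mpr (Or.inl ((g1 f p).mpr (Or.inl hf)))⟩
          · exact ⟨main, (g2 main p).mpr (Or.inl ((g1 main p).mpr
              (Or.inr ⟨hs, hns, hpe, rfl⟩)))⟩
        · exact ⟨pairing, (g2 pairing p).mpr (Or.inr ⟨hs, hns, hpe, rfl⟩)⟩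

theorem invC_fold (sel : PySem.Set String) (rows : List (List (String × String)))
    (pc : PySem.Dict String (PySem.Set String)) (cands : List String)
    (L : List (List (String × String))) (h : InvC sel pc cands L) :
    InvC sel (rows.foldl (pvRowConn sel) pc) (rows.foldl (pvCandRow sel) cands) (L ++ rows) := by
  induction rows generalizing pc cands L with
  | nil => simpa using h
  | cons r rs ih =>
    have := ih _ _ (L ++ [r]) (invC_row sel pc cands r L h)
    simpa using this

theorem invN_check (sel nodes : PySem.Set String) (cands : List String) (a b : String)
    (h1 : nodes = sel ++ cands) (h2 : (sel ++ cands).Nodup) :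
    ((if PySem.Set.contains sel a then PySem.Set.add nodes b else nodes)
      = sel ++ pvCandCheck sel cands a b) ∧ (sel ++ pvCandCheck sel cands a b).Nodup := by
  by_cases hca : PySem.Set.contains sel a = true
  · rw [if_pos hca]
    by_cases hcb : b ∈ sel
    · have hbn : b ∈ nodes := h1 ▸ List.mem_append_left _ hcb
      have hC : pvCandCheck sel cands a b = cands := by
        simp [pvCandCheck, hcb]
      rw [PySem.Set.add_of_mem hbn, hC]
      exact ⟨h1, h2⟩
    · by_cases hbc : b ∈ cands
      · have hbn : b ∈ nodes := h1 ▸ List.mem_append_right _ hbc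
        have hC : pvCandCheck sel cands a b = cands := by
          simp [pvCandCheck, hbc]
        rw [PySem.Set.add_of_mem hbn, hC]
        exact ⟨h1, h2⟩
      · have hbn : b ∉ nodes := by
          rw [h1]; simp [List.mem_append, hcb, hbc]
        have hbc' : cands.contains b = false := by
          simpa using hbc
        have hC : pvCandCheck sel cands a b = cands ++ [b] := by
          unfold pvCandCheck
          rw [if_pos (by
            simp
            exact ⟨⟨(PySem.Set.contains_iff sel a).mp hca, hcb⟩, hbc⟩)]
        have hbn' : b ∉ sel ++ cands := by rw [← h1]; exact hbn
        rw [PySem.Set.add_of_not_mem hbn, hC]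
        refine ⟨by rw [h1, List.append_assoc], ?_⟩
        rw [← List.append_assoc]
        refine List.nodup_append.mpr ⟨h2, List.nodup_singleton b, ?_⟩
        intro x hx y hy hxy
        exact hbn' ((List.mem_singleton.mp hy) ▸ (hxy ▸ hx))
  · rw [if_neg hca]
    have hC : pvCandCheck sel cands a b = cands := by
      unfold pvCandCheck
      rw [if_neg]
      intro hx
      rw [Bool.and_eq_true, Bool.and_eq_true] at hx
      exact hca hx.1.1
    rw [hC]
    exact ⟨h1, h2⟩

theorem invN_row (sel : PySem.Set String) (stA : PySem.Set String × PySem.Set (List String))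
    (cands : List String) (row : List (String × String)) (L : List (List (String × String)))
    (h : InvN sel stA.1 cands L) :
    InvN sel (pvRowGraph sel stA row).1 (pvCandRow sel cands row) (L ++ [row]) := by
  obtain ⟨h1, h2, h3⟩ := h
  rcases hm : (PySem.Dict.mk row).get? "main" with _ | main
  · rcases hp : (PySem.Dict.mk row).get? "pairing" with _ | pairing <;>
      simp only [pvRowGraph, pvCandRow, hm, hp] <;>
      exact ⟨h1, h2, fun p hpm => by
        obtain ⟨f, hf, hl⟩ := h3 p hpm
        exact ⟨f, hf, by rw [linked_append, hl, Bool.true_or]⟩⟩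
  · rcases hp : (PySem.Dict.mk row).get? "pairing" with _ | pairing
    · simp only [pvRowGraph, pvCandRow, hm, hp]
      exact ⟨h1, h2, fun p hpm => by
        obtain ⟨f, hf, hl⟩ := h3 p hpm
        exact ⟨f, hf, by rw [linked_append, hl, Bool.true_or]⟩⟩
    · have hrowlinks : ∀ f p, pvLinked [row] f p
          = ((main == f && pairing == p) || (pairing == f && main == p)) := by
        intro f p
        simp [pvLinked, pvRowLinks, hm, hp]
      have hB : pvCandRow sel cands row
          = pvCandCheck sel (pvCandCheck sel cands main pairing) pairing main := by
        simp only [pvCandRow, hm, hp]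
      have hA : (pvRowGraph sel stA row).1
          = (if PySem.Set.contains sel pairing then
              PySem.Set.add (if PySem.Set.contains sel main then PySem.Set.add stA.1 pairing else stA.1) main
            else (if PySem.Set.contains sel main then PySem.Set.add stA.1 pairing else stA.1)) := by
        simp only [pvRowGraph, hm, hp]
        by_cases m1 : main ∈ sel <;> by_cases m2 : pairing ∈ sel <;>
          simp [m1, m2]
      obtain ⟨s1, s1n⟩ := invN_check sel stA.1 cands main pairing h1 h2
      obtain ⟨s2, s2n⟩ := invN_check sel _ _ pairing main s1 s1n
      rw [hB, hA]
      refine ⟨s2, s2n, ?_⟩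
      intro p hp2mem
      rcases mem_candCheck _ _ _ _ _ hp2mem with hp1mem | ⟨hs, hns, hpe⟩
      · rcases mem_candCheck _ _ _ _ _ hp1mem with hpold | ⟨hs, hns, hpe⟩
        · obtain ⟨f, hf, hl⟩ := h3 p hpold
          exact ⟨f, hf, by rw [linked_append, hl, Bool.true_or]⟩
        · exact ⟨main, hs, by rw [linked_append, hrowlinks]; simp [hpe]⟩
      · exact ⟨pairing, hs, by rw [linked_append, hrowlinks]; simp [hpe]⟩

theorem invN_fold (sel : PySem.Set String) (rows : List (List (String × String)))
    (stA : PySem.Set String × PySem.Set (List String)) (cands : List String)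
    (L : List (List (String × String))) (h : InvN sel stA.1 cands L) :
    InvN sel (rows.foldl (pvRowGraph sel) stA).1 (rows.foldl (pvCandRow sel) cands) (L ++ rows) := by
  induction rows generalizing stA cands L with
  | nil => simpa using h
  | cons r rs ih =>
    have := ih _ _ (L ++ [r]) (invN_row sel stA cands r L h)
    simpa using this

theorem filter_map_fst {κ ν : Type} (l : List (κ × ν)) (Q : κ → ν → Bool) (g : κ → ν)
    (hg : ∀ pr ∈ l, pr.2 = g pr.1) :
    (l.filter (fun pr => Q pr.1 pr.2)).map (fun pr => pr.1)
      = (l.map (fun pr => pr.1)).filter (fun k => Q k (g k)) := by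
  induction l with
  | nil => rfl
  | cons x xs ih =>
    have hx := hg x (by simp)
    have ih' := ih (fun pr hpr => hg pr (by simp [hpr]))
    by_cases hq : Q x.1 (g x.1) = true <;> simp [hx, hq, ih']

theorem main_eq (selected_flavors : List String) (smaller_data : List (List (String × String))) :
    get_mutual_pairings selected_flavors smaller_data
      = get_mutual_pairings_alt selected_flavors smaller_data := by
  simp only [get_mutual_pairings, get_mutual_pairings_alt, get_expected_graph]
  set sel : PySem.Set String := PySem.Set.ofList (selected_flavors.map (fun f => PySem.Str.lower f)) with hsel
  have hselnd : sel.Nodup := PySem.Set.nodup_ofList _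
  set candsF := smaller_data.foldl (pvCandRow sel) [] with hcf
  by_cases hc : PySem.Set.len sel ≤ 1
  · rw [if_pos hc]
    have h0 : InvN sel (PySem.Set.ofList sel) [] [] := by
      refine ⟨by simp [PySem.Set.ofList_eq_self_of_nodup sel hselnd], by simp [hselnd], by simp⟩
    have hf := invN_fold sel smaller_data (PySem.Set.ofList sel, PySem.Set.empty) [] [] h0
    rw [List.nil_append] at hf
    obtain ⟨h1, h2, h3⟩ := hf
    rw [h1]
    have hdisj := List.nodup_append.mp h2
    have hfil1 : List.filter (fun x => !PySem.Set.contains sel x) sel = [] :=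
      List.filter_eq_nil_iff.mpr (fun x hx => by
        simp
        exact hx)
    have hfil2 : List.filter (fun x => !PySem.Set.contains sel x) candsF = candsF := by
      rw [List.filter_eq_self]
      intro x hx
      have hxs : x ∉ sel := fun hmem => hdisj.2.2 x hmem x hx rfl
      cases hcx : PySem.Set.contains sel x with
      | false => rfl
      | true => exact absurd ((PySem.Set.contains_iff sel x).mp hcx) hxs
    rw [PySem.Set.diff, List.filter_append, hfil1, hfil2, List.nil_append]
    have huniq : ∀ f ∈ sel, ∀ f' ∈ sel, f = f' := by
      match hsl : (sel : List String) with
      | [] => simp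
      | a :: t =>
        have hlen : t.length = 0 := by
          have h' : (((a :: t).length : Int)) ≤ 1 := hsl ▸ hc
          have h2' : (a :: t).length ≤ 1 := by exact_mod_cast h'
          rw [List.length_cons] at h2'
          omega
        rw [List.length_eq_zero_iff.mp hlen]
        simp
    have hpred : ∀ p ∈ candsF, (sel.all (fun f => pvLinked smaller_data f p)) = true := by
      intro p hpm
      obtain ⟨f0, hf0, hl0⟩ := h3 p hpm
      rw [List.all_eq_true]
      intro f hfm
      rw [huniq f hfm f0 hf0]
      exact hl0
    rw [List.filter_eq_self.mpr hpred, PySem.Set.ofList_eq_self_of_nodup _ hdisj.2.1]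
  · rw [if_neg hc]
    have h0 : InvC sel PySem.Dict.empty [] [] := by
      refine ⟨PySem.Dict.keys_empty, List.nodup_nil, ?_, by simp⟩
      intro f p
      rw [PySem.Dict.getD_empty]
      simp [pvLinked]
    have hf := invC_fold sel smaller_data PySem.Dict.empty [] [] h0
    rw [List.nil_append] at hf
    obtain ⟨k, n, g, e⟩ := hf
    set pcF := smaller_data.foldl (pvRowConn sel) PySem.Dict.empty with hpcF
    have hnodk : pcF.keys.Nodup := by rw [k]; exact n
    have hval : ∀ pr ∈ pcF.items, pr.2 = pcF.getD pr.1 PySem.Set.empty := by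
      intro pr hpr
      exact (PySem.Dict.getD_of_mem_items pcF (k := pr.1) (v := pr.2) (by simpa using hpr)
        hnodk PySem.Set.empty).symm
    rw [filter_map_fst pcF.items (fun _ v => PySem.Set.equal v sel)
      (fun k => pcF.getD k PySem.Set.empty) hval]
    have hkeys : pcF.items.map (fun pr => pr.1) = pcF.keys := rfl
    rw [hkeys, k]
    refine congrArg PySem.Set.ofList (List.filter_congr ?_)
    intro p hpm
    have hpn : p ∉ sel := by
      obtain ⟨f0, hf0⟩ := e p hpm
      exact ((g f0 p).mp hf0).2.1
    have hiff : PySem.Set.equal (pcF.getD p PySem.Set.empty) sel = true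
        ↔ (sel.all (fun f => pvLinked smaller_data f p)) = true := by
      rw [PySem.Set.equal_iff, List.all_eq_true]
      constructor
      · intro he f hfm
        exact ((g f p).mp ((he f).mpr hfm)).2.2
      · intro hall x
        constructor
        · intro hx
          exact ((g x p).mp hx).1
        · intro hx
          exact (g x p).mpr ⟨hx, hpn, hall x hx⟩
    cases hqa : PySem.Set.equal (pcF.getD p PySem.Set.empty) sel with
    | true => exact (hiff.mp hqa).symm
    | false =>
      cases hqb : (sel.all (fun f => pvLinked smaller_data f p)) with
      | false => rfl
      | true => exact absurd (hiff.mpr hqb) (by rw [hqa]; exact Bool.false_ne_true)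

-- ===== VERDICT (by name: the statement is the Claim_ definition above) =====
theorem get_mutual_pairings_spec : Claim_equal_get_mutual_pairings := by
  intro selected_flavors smaller_data _ _
  unfold Spec_get_mutual_pairings
  exact main_eq selected_flavors smaller_data
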